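-- pv_equiv track=rewrite | github.com/rohith18111407/DAA-Lab | Assignment-3/2.py | comparison_count_sort
-- ===== SOURCE A (Python) =====
-- def comparison_count_sort(nums):
--     count = [0] * len(nums)
--     nums_sorted = [0] * len(nums)
--     for i in range(len(nums) - 1):
--         for j in range(i + 1, len(nums)):
--             if nums[i] > nums[j]:
--                 count[i] += 1
--             elif nums[i] < nums[j]:
--                 count[j] += 1
--     for i in range(len(nums)):
--         nums_sorted[count[i]] = nums[i]
--     for i in range(len(nums_sorted)):
--         if nums_sorted[i]==0:
--             nums_sorted[i]=nums_sorted[i-1]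
--     return nums_sorted
-- ===== SOURCE B (Python) =====
-- def comparison_count_sort(nums):
--     return sorted(nums)
-- ===== Notes on version B (the rewrite author's own statement) =====
-- stated objective: faster
-- what changed: replaces the O(n^2) pairwise rank-counting, placement and zero-sentinel fill loops by a single library sort
-- intended difference: On lists that contain 0 together with a nonzero element and either a negative element or a unique maximum, A's fill loop treats the value 0 as an empty slot and overwrites it with its neighbour (wrapping to the last slot at index 0), so A returns a non-sorted list there, while B returns the sorted list, which is the evident intent of a sorting routine. — e.g. on comparison_count_sort([0, 1]): A returns [1, 1], B returns [0, 1]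
import Mathlib
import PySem

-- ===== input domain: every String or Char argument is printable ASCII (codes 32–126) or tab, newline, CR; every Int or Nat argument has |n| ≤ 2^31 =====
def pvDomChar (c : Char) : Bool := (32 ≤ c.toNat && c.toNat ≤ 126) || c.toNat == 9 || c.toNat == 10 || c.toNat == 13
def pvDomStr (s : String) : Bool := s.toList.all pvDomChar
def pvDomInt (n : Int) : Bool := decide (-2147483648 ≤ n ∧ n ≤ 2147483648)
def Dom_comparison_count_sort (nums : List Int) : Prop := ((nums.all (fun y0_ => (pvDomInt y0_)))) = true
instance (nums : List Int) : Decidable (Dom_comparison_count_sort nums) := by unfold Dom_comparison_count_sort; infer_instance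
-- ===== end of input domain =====

-- B replaces A's O(n^2) pairwise rank-counting, placement and zero-sentinel fill loops by a
-- single library sort; on lists containing 0 next to other values A's fill corrupts the output
-- (stated as the intended difference D_ below).

-- ===== PORT A =====
-- all indices A uses are in range, so the pySetD/pyGetD defaults are never taken (exact)
def comparison_count_sort (nums : List Int) : List Int :=
  let n : Int := nums.length
  let count : List Int := List.replicate nums.length 0
  let count := (PySem.List.pyRange 0 (n - 1) 1).foldl (fun count i =>
    (PySem.List.pyRange (i + 1) n 1).foldl (fun count j =>
      if PySem.List.pyGetD nums i 0 > PySem.List.pyGetD nums j 0 then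
        PySem.List.pySetD count i (PySem.List.pyGetD count i 0 + 1)
      else if PySem.List.pyGetD nums i 0 < PySem.List.pyGetD nums j 0 then
        PySem.List.pySetD count j (PySem.List.pyGetD count j 0 + 1)
      else count) count) count
  let ns : List Int := List.replicate nums.length 0
  let ns := (PySem.List.pyRange 0 n 1).foldl (fun ns i =>
      PySem.List.pySetD ns (PySem.List.pyGetD count i 0) (PySem.List.pyGetD nums i 0)) ns
  let ns := (PySem.List.pyRange 0 (ns.length : Int) 1).foldl (fun ns i =>
      if PySem.List.pyGetD ns i 0 == 0 then
        PySem.List.pySetD ns i (PySem.List.pyGetD ns (i - 1) 0)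
      else ns) ns
  ns

-- ===== PORT B =====
def comparison_count_sort_alt (nums : List Int) : List Int :=
  PySem.List.sorted nums (fun x => x) false

-- ===== PRECONDITION & SPEC =====
-- helper for D_: Python max(nums) over a list that is known to contain 0 (so the 0 seed is exact there)
def pvMax (nums : List Int) : Int := nums.foldr max 0

-- On lists containing 0 together with a nonzero element and either a negative element or a
-- unique maximum, A's fill loop treats the value 0 as an empty slot and overwrites it with a
-- neighbour (wrapping to the last slot at index 0), so A returns a non-sorted list there;
-- B returns the sorted list, the evident intent of a sorting routine.
def D_comparison_count_sort (nums : List Int) : Prop :=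
  (0 : Int) ∈ nums ∧ (∃ x ∈ nums, x ≠ 0) ∧
    ((∃ x ∈ nums, x < 0) ∨ nums.count (pvMax nums) = 1)
instance (nums : List Int) : Decidable (D_comparison_count_sort nums) := by
  unfold D_comparison_count_sort; infer_instance

def Spec_comparison_count_sort (nums : List Int) (out : List Int) : Prop :=
  ¬ D_comparison_count_sort nums → out = comparison_count_sort_alt nums
instance (nums : List Int) (out : List Int) : Decidable (Spec_comparison_count_sort nums out) := by
  unfold Spec_comparison_count_sort; infer_instance

def pvDiffWitness_comparison_count_sort : List Int := [0, 1]
def pvDiffWitnessOut_comparison_count_sort : (List Int) × (List Int) := ([1, 1], [0, 1])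

-- ===== CLAIM (what is proved, stated in full; the proofs are below) =====
def Claim_unchanged_comparison_count_sort : Prop := ∀ (nums : List Int), Dom_comparison_count_sort nums → Spec_comparison_count_sort nums (comparison_count_sort nums)
def Claim_changed_comparison_count_sort : Prop := Dom_comparison_count_sort (pvDiffWitness_comparison_count_sort) ∧ D_comparison_count_sort (pvDiffWitness_comparison_count_sort) ∧ comparison_count_sort (pvDiffWitness_comparison_count_sort) = pvDiffWitnessOut_comparison_count_sort.1 ∧ comparison_count_sort_alt (pvDiffWitness_comparison_count_sort) = pvDiffWitnessOut_comparison_count_sort.2 ∧ pvDiffWitnessOut_comparison_count_sort.1 ≠ pvDiffWitnessOut_comparison_count_sort.2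
def Claim_exact_comparison_count_sort : Prop := ∀ (nums : List Int), Dom_comparison_count_sort nums → D_comparison_count_sort nums → comparison_count_sort nums ≠ comparison_count_sort_alt nums

-- ===== LEMMAS AND PROOFS =====

-- proof-side names for A's phases (each definitionally equal to the port's let-bound values)
def pvInner (nums : List Int) (i : Int) (count : List Int) (j : Int) : List Int :=
  if PySem.List.pyGetD nums i 0 > PySem.List.pyGetD nums j 0 then
    PySem.List.pySetD count i (PySem.List.pyGetD count i 0 + 1)
  else if PySem.List.pyGetD nums i 0 < PySem.List.pyGetD nums j 0 then
    PySem.List.pySetD count j (PySem.List.pyGetD count j 0 + 1)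
  else count

def pvOuter (nums : List Int) (count : List Int) (i : Int) : List Int :=
  (PySem.List.pyRange (i + 1) (nums.length : Int) 1).foldl (pvInner nums i) count

def pvCount (nums : List Int) : List Int :=
  (PySem.List.pyRange 0 ((nums.length : Int) - 1) 1).foldl (pvOuter nums)
    (List.replicate nums.length 0)

def pvPlaced (nums : List Int) : List Int :=
  (PySem.List.pyRange 0 (nums.length : Int) 1).foldl (fun ns i =>
    PySem.List.pySetD ns (PySem.List.pyGetD (pvCount nums) i 0) (PySem.List.pyGetD nums i 0))
    (List.replicate nums.length 0)

theorem pv_A_eq (nums : List Int) :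
    comparison_count_sort nums =
      (PySem.List.pyRange 0 ((pvPlaced nums).length : Int) 1).foldl (fun ns i =>
        if PySem.List.pyGetD ns i 0 == 0 then
          PySem.List.pySetD ns i (PySem.List.pyGetD ns (i - 1) 0)
        else ns) (pvPlaced nums) := rfl

-- the sorted list B returns
def pvS (nums : List Int) : List Int := PySem.List.sorted nums (fun x => x) false

-- the place A sends each value to, written over the values themselves
def pvCanon (nums : List Int) : List Int :=
  nums.foldl (fun ns v =>
    PySem.List.pySetD ns ((nums.countP (fun x => decide (x < v)) : Nat) : Int) v)
    (List.replicate nums.length 0)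

-- pyGetD at a nonnegative Int index is List.getD at its toNat
theorem pv_pyGetD_toNat (xs : List Int) (i : Int) (hi : 0 ≤ i) (d : Int) :
    PySem.List.pyGetD xs i d = xs.getD i.toNat d := by
  rw [← Int.toNat_of_nonneg hi, PySem.List.pyGetD_natCast, Int.toNat_natCast]

theorem pv_pySetD_toNat (xs : List Int) (i : Int) (hi : 0 ≤ i) (v : Int) :
    PySem.List.pySetD xs i v = xs.set i.toNat v := by
  rw [← Int.toNat_of_nonneg hi, PySem.List.pySetD_natCast, Int.toNat_natCast]

-- getD after set
theorem pv_getD_set (xs : List Int) (i k : Nat) (v d : Int) :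
    (xs.set i v).getD k d = if k = i ∧ i < xs.length then v else xs.getD k d := by
  simp only [List.getD_eq_getElem?_getD, List.getElem?_set]
  split_ifs with h1 h2 h3 h4 <;> simp_all <;> omega

-- countP of nums splits around position k
theorem pv_countP_split (nums : List Int) (k : Nat) (hk : k < nums.length) (p : Int → Bool) :
    nums.countP p = (nums.take k).countP p + (if p (nums.getD k 0) then 1 else 0)
      + (nums.drop (k + 1)).countP p := by
  conv_lhs => rw [← List.take_append_drop k nums]
  rw [List.drop_eq_getElem_cons hk, List.countP_append, List.countP_cons]
  have h : nums.getD k 0 = nums[k] := by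
    simp [List.getD_eq_getElem?_getD, List.getElem?_eq_getElem hk]
  rw [h]
  by_cases hp : p nums[k] <;> simp [hp] <;> omega

-- drop step
theorem pv_drop_cons (nums : List Int) (k : Nat) (hk : k < nums.length) :
    nums.drop k = nums.getD k 0 :: nums.drop (k + 1) := by
  rw [List.drop_eq_getElem_cons hk]
  simp [List.getD_eq_getElem?_getD, List.getElem?_eq_getElem hk]

-- one inner-loop step, in getD/set form
theorem pv_pvInner_eval (nums : List Int) (i l : Int) (c : List Int) (hi : 0 ≤ i) (hl : 0 ≤ l) :
    pvInner nums i c l =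
      if nums.getD l.toNat 0 < nums.getD i.toNat 0 then
        c.set i.toNat (c.getD i.toNat 0 + 1)
      else if nums.getD i.toNat 0 < nums.getD l.toNat 0 then
        c.set l.toNat (c.getD l.toNat 0 + 1)
      else c := by
  unfold pvInner
  rw [pv_pyGetD_toNat nums i hi, pv_pyGetD_toNat nums l hl, pv_pyGetD_toNat c i hi,
    pv_pyGetD_toNat c l hl, pv_pySetD_toNat c i hi, pv_pySetD_toNat c l hl]

-- ---------- A: the nested counting loops ----------

-- inner loop: contribution of pairs (i, j), j ∈ [l, n)
theorem pv_inner_core (nums : List Int) (i : Int) (hi : 0 ≤ i) :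
    ∀ (m : Nat) (l : Int) (c : List Int), ((nums.length : Int) - l).toNat = m → i < l →
      c.length = nums.length →
      (((PySem.List.pyRange l (nums.length : Int) 1).foldl (pvInner nums i) c).length =
        nums.length ∧
      ∀ k : Nat, k < nums.length →
        ((PySem.List.pyRange l (nums.length : Int) 1).foldl (pvInner nums i) c).getD k 0 =
          c.getD k 0 +
            (if (k : Int) = i then
              (((nums.drop l.toNat).countP (fun x => decide (x < nums.getD i.toNat 0))) : Int)
            else if l ≤ (k : Int) then
              (if nums.getD i.toNat 0 < nums.getD k 0 then 1 else 0)
            else 0)) := by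
  intro m
  induction m with
  | zero =>
    intro l c h0 hil hc
    have hnl : (nums.length : Int) ≤ l := by omega
    rw [PySem.List.pyRange_one_eq_nil hnl, List.foldl_nil]
    refine ⟨hc, ?_⟩
    intro k hk
    have hdrop : nums.drop l.toNat = [] := List.drop_eq_nil_of_le (by omega)
    rw [hdrop]
    simp only [List.countP_nil, Nat.cast_zero]
    split_ifs with h1 h2 h3
    all_goals first
      | (exfalso; omega)
      | simp
  | succ m ih =>
    intro l c h0 hil hc
    have hln : l < (nums.length : Int) := by omega
    have hl0 : 0 ≤ l := by omega
    have hi_lt_n : i.toNat < nums.length := by omega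
    have hl_lt_n : l.toNat < nums.length := by omega
    have hl1 : (l + 1).toNat = l.toNat + 1 := by omega
    have hdropl : nums.drop l.toNat = nums.getD l.toNat 0 :: nums.drop (l.toNat + 1) :=
      pv_drop_cons nums l.toNat hl_lt_n
    rw [PySem.List.pyRange_one_cons hln, List.foldl_cons, pv_pvInner_eval nums i l c hi hl0]
    by_cases h1 : nums.getD l.toNat 0 < nums.getD i.toNat 0
    · rw [if_pos h1]
      obtain ⟨hlen, hval⟩ := ih (l + 1) (c.set i.toNat (c.getD i.toNat 0 + 1)) (by omega)
        (by omega) (by simpa using hc)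
      refine ⟨hlen, ?_⟩
      intro k hk
      rw [hval k hk, pv_getD_set]
      by_cases hki : (k : Int) = i
      · rw [if_pos (show k = i.toNat ∧ i.toNat < c.length from ⟨by omega, by omega⟩)]
        simp only [if_pos hki]
        rw [hl1, hdropl, List.countP_cons]
        simp only [decide_eq_true_eq]
        rw [if_pos h1, show k = i.toNat from by omega]
        push_cast
        ring
      · rw [if_neg (by rintro ⟨h, -⟩; omega)]
        simp only [if_neg hki]
        by_cases hkl2 : (k : Int) = l
        · have hkk : k = l.toNat := by omega
          rw [if_pos (by omega : l ≤ (k : Int)), if_neg (by omega : ¬ l + 1 ≤ (k : Int)), hkk,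
            if_neg (lt_asymm h1)]
          all_goals simp
        · by_cases hle : l + 1 ≤ (k : Int)
          · rw [if_pos hle, if_pos (by omega : l ≤ (k : Int))]
          · rw [if_neg hle, if_neg (by omega : ¬ l ≤ (k : Int))]
    · rw [if_neg h1]
      by_cases h2 : nums.getD i.toNat 0 < nums.getD l.toNat 0
      · rw [if_pos h2]
        obtain ⟨hlen, hval⟩ := ih (l + 1) (c.set l.toNat (c.getD l.toNat 0 + 1)) (by omega)
          (by omega) (by simpa using hc)
        refine ⟨hlen, ?_⟩
        intro k hk
        rw [hval k hk, pv_getD_set]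
        by_cases hki : (k : Int) = i
        · rw [if_neg (by rintro ⟨h, -⟩; omega)]
          simp only [if_pos hki]
          rw [hl1, hdropl, List.countP_cons]
          simp only [decide_eq_true_eq]
          rw [if_neg h1]
          simp
        · simp only [if_neg hki]
          by_cases hkl2 : (k : Int) = l
          · rw [if_pos (show k = l.toNat ∧ l.toNat < c.length from ⟨by omega, by omega⟩),
              if_neg (by omega : ¬ l + 1 ≤ (k : Int)),
              if_pos (by omega : l ≤ (k : Int)),
              show k = l.toNat from by omega, if_pos h2]
            ring
          · rw [if_neg (by rintro ⟨h, -⟩; omega)]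
            by_cases hle : l + 1 ≤ (k : Int)
            · rw [if_pos hle, if_pos (by omega : l ≤ (k : Int))]
            · rw [if_neg hle, if_neg (by omega : ¬ l ≤ (k : Int))]
      · rw [if_neg h2]
        obtain ⟨hlen, hval⟩ := ih (l + 1) c (by omega) (by omega) hc
        refine ⟨hlen, ?_⟩
        intro k hk
        rw [hval k hk]
        by_cases hki : (k : Int) = i
        · simp only [if_pos hki]
          rw [hl1, hdropl, List.countP_cons]
          simp only [decide_eq_true_eq]
          rw [if_neg h1]
          simp
        · simp only [if_neg hki]
          by_cases hkl2 : (k : Int) = l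
          · have hkk : k = l.toNat := by omega
            rw [if_neg (by omega : ¬ l + 1 ≤ (k : Int)), if_pos (by omega : l ≤ (k : Int)), hkk,
              if_neg h2]
            all_goals simp
          · by_cases hle : l + 1 ≤ (k : Int)
            · rw [if_pos hle, if_pos (by omega : l ≤ (k : Int))]
            · rw [if_neg hle, if_neg (by omega : ¬ l ≤ (k : Int))]

-- outer loop invariant value
def pvT (nums : List Int) (m : Int) (k : Nat) : Int :=
  ((nums.take (min m.toNat k)).countP (fun x => decide (x < nums.getD k 0)) : Int) +
    (if (k : Int) < m then
      ((nums.drop (k + 1)).countP (fun x => decide (x < nums.getD k 0)) : Int)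
    else 0)

theorem pv_outer_core (nums : List Int) :
    ∀ (t : Nat) (m : Int) (c : List Int), (((nums.length : Int) - 1) - m).toNat = t → 0 ≤ m →
      c.length = nums.length →
      (∀ k : Nat, k < nums.length → c.getD k 0 = pvT nums m k) →
      (((PySem.List.pyRange m ((nums.length : Int) - 1) 1).foldl (pvOuter nums) c).length =
        nums.length ∧
      ∀ k : Nat, k < nums.length →
        ((PySem.List.pyRange m ((nums.length : Int) - 1) 1).foldl (pvOuter nums) c).getD k 0 =
          (nums.countP (fun x => decide (x < nums.getD k 0)) : Int)) := by
  intro t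
  induction t with
  | zero =>
    intro m c h0 hm hc hinv
    rw [PySem.List.pyRange_one_eq_nil (by omega), List.foldl_nil]
    refine ⟨hc, ?_⟩
    intro k hk
    rw [hinv k hk]
    unfold pvT
    rw [show min m.toNat k = k from by omega]
    have hsplit := pv_countP_split nums k hk (fun x => decide (x < nums.getD k 0))
    simp only [decide_eq_true_eq, lt_self_iff_false, if_false] at hsplit
    by_cases hkm : (k : Int) < m
    · rw [if_pos hkm, hsplit]
      push_cast
      ring
    · rw [if_neg hkm]
      have hdrop : nums.drop (k + 1) = [] := List.drop_eq_nil_of_le (by omega)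
      rw [hdrop] at hsplit
      simp only [List.countP_nil] at hsplit
      rw [hsplit]
      push_cast
      ring
  | succ t ih =>
    intro m c h0 hm hc hinv
    rw [PySem.List.pyRange_one_cons (by omega : m < (nums.length : Int) - 1), List.foldl_cons]
    rw [show pvOuter nums c m =
      (PySem.List.pyRange (m + 1) (nums.length : Int) 1).foldl (pvInner nums m) c from rfl]
    obtain ⟨h1len, h1val⟩ := pv_inner_core nums m hm (((nums.length : Int) - (m + 1)).toNat)
      (m + 1) c rfl (by omega) hc
    refine ih (m + 1) _ (by omega) (by omega) h1len ?_
    intro k hk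
    rw [h1val k hk, hinv k hk]
    unfold pvT
    have hm1 : (m + 1).toNat = m.toNat + 1 := by omega
    rw [hm1]
    by_cases hki : (k : Int) = m
    · have hkk : k = m.toNat := by omega
      rw [if_pos hki, show min m.toNat k = k from by omega,
        show min (m.toNat + 1) k = k from by omega,
        if_neg (by omega : ¬ (k : Int) < m), if_pos (by omega : (k : Int) < m + 1), hkk]
      ring
    · rw [if_neg hki]
      by_cases hkm : (k : Int) < m
      · rw [if_neg (by omega : ¬ m + 1 ≤ (k : Int)),
          show min m.toNat k = k from by omega, show min (m.toNat + 1) k = k from by omega,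
          if_pos hkm, if_pos (by omega : (k : Int) < m + 1)]
        ring
      · have hgt : m + 1 ≤ (k : Int) := by omega
        rw [if_pos hgt, show min m.toNat k = m.toNat from by omega,
          show min (m.toNat + 1) k = m.toNat + 1 from by omega,
          if_neg hkm, if_neg (by omega : ¬ (k : Int) < m + 1)]
        rw [List.take_succ, List.countP_append]
        have hmem : nums[m.toNat]? = some (nums.getD m.toNat 0) := by
          rw [List.getElem?_eq_getElem (show m.toNat < nums.length from by omega)]
          simp [List.getD_eq_getElem?_getD,
            List.getElem?_eq_getElem (show m.toNat < nums.length from by omega)]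
        rw [hmem]
        simp only [Option.toList_some, List.countP_cons, List.countP_nil, decide_eq_true_eq]
        split_ifs <;> push_cast <;> ring

theorem pv_count_char (nums : List Int) :
    (pvCount nums).length = nums.length ∧
    ∀ k : Nat, k < nums.length →
      (pvCount nums).getD k 0 = (nums.countP (fun x => decide (x < nums.getD k 0)) : Int) := by
  unfold pvCount
  refine pv_outer_core nums ((((nums.length : Int) - 1) - 0).toNat) 0 _ rfl le_rfl (by simp) ?_
  intro k hk
  simp [pvT, hk]

-- A's placement over indices is the canonical placement over elements
theorem pv_placeA (nums count : List Int)
    (hchar : ∀ k : Nat, k < nums.length →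
      count.getD k 0 = (nums.countP (fun x => decide (x < nums.getD k 0)) : Int)) :
    ∀ (m : Nat) (a : Int) (init : List Int), ((nums.length : Int) - a).toNat = m → 0 ≤ a →
      (PySem.List.pyRange a (nums.length : Int) 1).foldl (fun ns i =>
        PySem.List.pySetD ns (PySem.List.pyGetD count i 0) (PySem.List.pyGetD nums i 0)) init =
      (nums.drop a.toNat).foldl (fun ns v =>
        PySem.List.pySetD ns ((nums.countP (fun x => decide (x < v)) : Nat) : Int) v) init := by
  intro m
  induction m with
  | zero =>
    intro a init h0 ha
    rw [PySem.List.pyRange_one_eq_nil (by omega),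
      List.drop_eq_nil_of_le (by omega : nums.length ≤ a.toNat)]
    simp
  | succ m ih =>
    intro a init h0 ha
    rw [PySem.List.pyRange_one_cons (by omega), pv_drop_cons nums a.toNat (by omega)]
    simp only [List.foldl_cons]
    rw [pv_pyGetD_toNat count a ha, pv_pyGetD_toNat nums a ha, hchar a.toNat (by omega)]
    have h := ih (a + 1) (PySem.List.pySetD init
      ((nums.countP (fun x => decide (x < nums.getD a.toNat 0)) : Nat) : Int)
      (nums.getD a.toNat 0)) (by omega) (by omega)
    rw [show (a + 1).toNat = a.toNat + 1 from by omega] at h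
    exact h

theorem pv_placedA_eq (nums : List Int) : pvPlaced nums = pvCanon nums := by
  obtain ⟨-, hchar⟩ := pv_count_char nums
  unfold pvPlaced pvCanon
  have h := pv_placeA nums (pvCount nums) hchar nums.length 0 (List.replicate nums.length 0)
    (by simp) le_rfl
  simpa using h

-- in a sorted list, the first index of v counts the elements below v
theorem pv_idxOf_sorted :
    ∀ (s : List Int), s.Pairwise (· ≤ ·) → ∀ v, v ∈ s →
      s.idxOf v = s.countP (fun x => decide (x < v)) := by
  intro s
  induction s with
  | nil => intro _ v hv; cases hv
  | cons a t ih =>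
    intro hp v hv
    obtain ⟨hall, hp'⟩ := List.pairwise_cons.mp hp
    by_cases hav : a = v
    · subst hav
      rw [List.idxOf_cons_self, List.countP_cons]
      have h0 : t.countP (fun x => decide (x < a)) = 0 := by
        rw [List.countP_eq_zero]
        intro x hx
        simp only [decide_eq_true_eq, not_lt]
        exact hall x hx
      simp [h0]
    · have hvt : v ∈ t := by
        rcases List.mem_cons.mp hv with h | h
        · exact absurd h.symm hav
        · exact h
      have hidx : (a :: t).idxOf v = t.idxOf v + 1 := by
        simp [List.idxOf_cons, hav]
      rw [hidx, List.countP_cons, ih hp' v hvt]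
      have hd : decide (a < v) = true := by
        simp only [decide_eq_true_eq]
        exact lt_of_le_of_ne (hall v hvt) hav
      rw [hd]
      simp

-- ---------- fill loop ----------

def pvScan : List Int → Int → List Int
  | [], _ => []
  | v :: t, prev => (if v ≠ 0 then v else prev) :: pvScan t (if v ≠ 0 then v else prev)

theorem pv_scan_cons (v : Int) (t : List Int) (prev : Int) :
    pvScan (v :: t) prev =
      (if v ≠ 0 then v else prev) :: pvScan t (if v ≠ 0 then v else prev) := rfl

theorem pv_scan_zero_cons (t : List Int) (prev : Int) :
    pvScan ((0 : Int) :: t) prev = prev :: pvScan t prev := by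
  rw [pv_scan_cons]
  simp

theorem pv_set_append (pre : List Int) (x : Int) (t : List Int) (y : Int) :
    (pre ++ x :: t).set pre.length y = pre ++ y :: t := by
  induction pre with
  | nil => simp
  | cons a l ih => simp [ih]

theorem pv_getLast_eq_getLastD (l : List Int) (h : l ≠ []) : l.getLast h = l.getLastD 0 := by
  rw [List.getLastD_eq_getLast?, List.getLast?_eq_some_getLast h]
  rfl

theorem pv_getD_last (l : List Int) (h : l ≠ []) : l.getD (l.length - 1) 0 = l.getLastD 0 := by
  rw [List.getD_eq_getElem?_getD, ← List.getLast?_eq_getElem?, List.getLastD_eq_getLast?]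

theorem pv_fillA :
    ∀ (suf pre : List Int) (prev : Int) (N : Nat), N = pre.length + suf.length →
      prev = (if pre.isEmpty then suf.getLastD 0 else pre.getLastD 0) →
      (PySem.List.pyRange (pre.length : Int) (N : Int) 1).foldl
        (fun ns i =>
          if PySem.List.pyGetD ns i 0 == 0 then
            PySem.List.pySetD ns i (PySem.List.pyGetD ns (i - 1) 0)
          else ns) (pre ++ suf) = pre ++ pvScan suf prev := by
  intro suf
  induction suf with
  | nil =>
    intro pre prev N hN hprev
    simp only [List.length_nil, Nat.add_zero] at hN
    rw [PySem.List.pyRange_one_eq_nil (by omega), List.foldl_nil]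
    simp [pvScan]
  | cons v t ih =>
    intro pre prev N hN hprev
    have hNlen : N = pre.length + (t.length + 1) := by simpa using hN
    rw [PySem.List.pyRange_one_cons (by omega)]
    simp only [List.foldl_cons]
    have hget : PySem.List.pyGetD (pre ++ v :: t) (pre.length : Int) 0 = v := by
      rw [PySem.List.pyGetD_natCast]
      simp [List.getD_eq_getElem?_getD, List.getElem?_append_right (le_refl pre.length)]
    rw [hget]
    have hcast : ((pre.length : Int) + 1) = (((pre.length + 1 : Nat) : Int)) := by push_cast; ring
    by_cases hv : v = 0
    · rw [if_pos (by simp [hv])]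
      have hprev' : PySem.List.pyGetD (pre ++ v :: t) ((pre.length : Int) - 1) 0 = prev := by
        by_cases hpre : pre = []
        · subst hpre
          simp only [List.isEmpty_nil, if_true] at hprev
          rw [show ((([] : List Int).length : Int) - 1) = -1 from by simp, List.nil_append,
            PySem.List.pyGetD_neg_one (v :: t) 0 (by simp),
            pv_getLast_eq_getLastD (v :: t) (by simp)]
          exact hprev.symm
        · have hlp : 1 ≤ pre.length := List.length_pos_of_ne_nil hpre
          rw [show ((pre.length : Int) - 1) = ((pre.length - 1 : Nat) : Int) from by omega,
            PySem.List.pyGetD_natCast, List.getD_eq_getElem?_getD,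
            List.getElem?_append_left (by omega), ← List.getD_eq_getElem?_getD,
            pv_getD_last pre hpre]
          rw [if_neg (by simp [hpre])] at hprev
          exact hprev.symm
      rw [hprev', PySem.List.pySetD_natCast, pv_set_append pre v t prev]
      rw [show pre ++ prev :: t = (pre ++ [prev]) ++ t from by simp]
      rw [hcast, show ((pre.length + 1 : Nat)) = (pre ++ [prev]).length from by simp]
      rw [ih (pre ++ [prev]) prev N (by simp; omega) (by simp)]
      simp [pvScan, hv]
    · rw [if_neg (by simp [hv])]
      rw [show pre ++ v :: t = (pre ++ [v]) ++ t from by simp]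
      rw [hcast, show ((pre.length + 1 : Nat)) = (pre ++ [v]).length from by simp]
      rw [ih (pre ++ [v]) v N (by simp; omega) (by simp)]
      simp [pvScan, hv]

-- A is the fill scan over the canonical placement
theorem pv_A_scan (nums : List Int) :
    comparison_count_sort nums = pvScan (pvCanon nums) ((pvCanon nums).getLastD 0) := by
  rw [pv_A_eq, pv_placedA_eq]
  have h := pv_fillA (pvCanon nums) [] ((pvCanon nums).getLastD 0) (pvCanon nums).length
    (by simp) (by simp)
  simpa using h

-- ---------- the canonical placement is the sorted list with later duplicates zeroed ----------

theorem pv_sorted_getD_le (s : List Int) (hp : s.Pairwise (· ≤ ·)) (i j : Nat)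
    (hij : i ≤ j) (hj : j < s.length) : s.getD i 0 ≤ s.getD j 0 := by
  have hi : i < s.length := by omega
  rcases eq_or_lt_of_le hij with h | h
  · subst h; exact le_refl _
  · have := List.pairwise_iff_getElem.mp hp i j hi hj h
    simpa [List.getD_eq_getElem?_getD, List.getElem?_eq_getElem hi,
      List.getElem?_eq_getElem hj] using this

theorem pv_getD_mem (s : List Int) (k : Nat) (hk : k < s.length) : s.getD k 0 ∈ s := by
  rw [List.getD_eq_getElem?_getD, List.getElem?_eq_getElem hk]
  exact List.getElem_mem hk

theorem pv_cnt_eq_idxOf (nums : List Int) (v : Int) (hv : v ∈ nums) :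
    nums.countP (fun x => decide (x < v)) = (pvS nums).idxOf v := by
  have hperm : (pvS nums).Perm nums := PySem.List.sorted_perm nums (fun x => x) false
  have hp : (pvS nums).Pairwise (· ≤ ·) := by
    simpa using PySem.List.sorted_pairwise nums (fun x => x)
  have hvs : v ∈ pvS nums := by rw [pvS, PySem.List.mem_sorted]; exact hv
  rw [pv_idxOf_sorted _ hp v hvs, hperm.countP_eq]

theorem pv_canon_core (nums : List Int) :
    ∀ (l : List Int), (∀ v ∈ l, v ∈ nums) → ∀ (acc : List Int), acc.length = nums.length →
      ((l.foldl (fun ns v =>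
        PySem.List.pySetD ns ((nums.countP (fun x => decide (x < v)) : Nat) : Int) v) acc).length
          = nums.length ∧
      ∀ k : Nat, k < nums.length →
        (l.foldl (fun ns v =>
          PySem.List.pySetD ns ((nums.countP (fun x => decide (x < v)) : Nat) : Int) v)
            acc).getD k 0 =
          if (∃ v ∈ l, (pvS nums).idxOf v = k) then (pvS nums).getD k 0 else acc.getD k 0) := by
  intro l
  induction l with
  | nil =>
    intro _ acc hacc
    refine ⟨hacc, ?_⟩
    intro k hk
    simp
  | cons v t ih =>
    intro hsub acc hacc
    have hv : v ∈ nums := hsub v (by simp)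
    have hvs : v ∈ pvS nums := by rw [pvS, PySem.List.mem_sorted]; exact hv
    have hidx : (pvS nums).idxOf v < (pvS nums).length := List.idxOf_lt_length_of_mem hvs
    have hslen : (pvS nums).length = nums.length := PySem.List.length_sorted nums _ _
    simp only [List.foldl_cons]
    have hstep : PySem.List.pySetD acc ((nums.countP (fun x => decide (x < v)) : Nat) : Int) v
        = acc.set ((pvS nums).idxOf v) v := by
      rw [pv_cnt_eq_idxOf nums v hv, PySem.List.pySetD_natCast]
    rw [hstep]
    obtain ⟨hlen, hval⟩ := ih (fun w hw => hsub w (by simp [hw]))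
      (acc.set ((pvS nums).idxOf v) v) (by simpa using hacc)
    refine ⟨hlen, ?_⟩
    intro k hk
    rw [hval k hk, pv_getD_set]
    by_cases ht : ∃ w ∈ t, (pvS nums).idxOf w = k
    · rw [if_pos ht, if_pos (by obtain ⟨w, hw1, hw2⟩ := ht; exact ⟨w, by simp [hw1], hw2⟩)]
    · rw [if_neg ht]
      by_cases hkv : (pvS nums).idxOf v = k
      · rw [if_pos ⟨by omega, by omega⟩, if_pos ⟨v, by simp, hkv⟩]
        have : (pvS nums).getD ((pvS nums).idxOf v) 0 = v := by
          rw [List.getD_eq_getElem?_getD, List.getElem?_eq_getElem hidx]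
          simp [List.getElem_idxOf]
        rw [← hkv, this]
      · rw [if_neg (by rintro ⟨h, -⟩; exact hkv (by omega)),
          if_neg (by rintro ⟨w, hw, hwk⟩; rcases List.mem_cons.mp hw with rfl | hw'
                     · exact hkv hwk
                     · exact ht ⟨w, hw', hwk⟩)]

theorem pv_canon_char (nums : List Int) :
    (pvCanon nums).length = nums.length ∧
    ∀ k : Nat, k < nums.length →
      (pvCanon nums).getD k 0 =
        if (pvS nums).idxOf ((pvS nums).getD k 0) = k then (pvS nums).getD k 0 else 0 := by
  obtain ⟨hlen, hval⟩ := pv_canon_core nums nums (fun v hv => hv)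
    (List.replicate nums.length 0) (by simp)
  refine ⟨hlen, ?_⟩
  intro k hk
  have hslen : (pvS nums).length = nums.length := PySem.List.length_sorted nums _ _
  rw [show pvCanon nums = nums.foldl (fun ns v =>
      PySem.List.pySetD ns ((nums.countP (fun x => decide (x < v)) : Nat) : Int) v)
      (List.replicate nums.length 0) from rfl, hval k hk]
  have hiff : (∃ v ∈ nums, (pvS nums).idxOf v = k) ↔
      (pvS nums).idxOf ((pvS nums).getD k 0) = k := by
    constructor
    · rintro ⟨v, hv, hvk⟩
      have hvs : v ∈ pvS nums := by rw [pvS, PySem.List.mem_sorted]; exact hv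
      have hidx : (pvS nums).idxOf v < (pvS nums).length := List.idxOf_lt_length_of_mem hvs
      have : (pvS nums).getD k 0 = v := by
        rw [← hvk, List.getD_eq_getElem?_getD, List.getElem?_eq_getElem hidx]
        simp [List.getElem_idxOf]
      rw [this, hvk]
    · intro h
      refine ⟨(pvS nums).getD k 0, ?_, h⟩
      rw [← PySem.List.mem_sorted nums (fun x => x) false]
      exact pv_getD_mem (pvS nums) k (by rw [hslen]; exact hk)
  by_cases h : (pvS nums).idxOf ((pvS nums).getD k 0) = k
  · rw [if_pos h, if_pos (hiff.mpr h)]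
  · rw [if_neg h, if_neg (fun hx => h (hiff.mp hx))]
    simp

theorem pv_countP_take_drop (l : List Int) (j : Nat) (p : Int → Bool) :
    l.countP p = (l.take j).countP p + (l.drop j).countP p := by
  conv_lhs => rw [← List.take_append_drop j l]
  rw [List.countP_append]

theorem pv_count_take_drop (l : List Int) (j : Nat) (a : Int) :
    l.count a = (l.take j).count a + (l.drop j).count a := by
  conv_lhs => rw [← List.take_append_drop j l]
  rw [List.count_append]

-- first-occurrence indices of a sorted list are those that differ from their left neighbour
theorem pv_first_occ_iff (s : List Int) (hp : s.Pairwise (· ≤ ·)) (k : Nat)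
    (hk : k < s.length) :
    s.idxOf (s.getD k 0) = k ↔ (k = 0 ∨ s.getD (k - 1) 0 ≠ s.getD k 0) := by
  have hmem : s.getD k 0 ∈ s := pv_getD_mem s k hk
  rw [pv_idxOf_sorted s hp _ hmem]
  constructor
  · intro hcnt
    by_contra hcond
    push_neg at hcond
    obtain ⟨hk0, heq⟩ := hcond
    -- then every x counted lies in take (k-1), so countP ≤ k-1 < k
    have hle : s.countP (fun x => decide (x < s.getD k 0)) ≤ k - 1 := by
      have hdrop0 : (s.drop (k - 1)).countP (fun x => decide (x < s.getD k 0)) = 0 := by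
        rw [List.countP_eq_zero]
        intro x hx
        simp only [decide_eq_true_eq, not_lt]
        obtain ⟨i, hi, hxe⟩ := List.mem_iff_getElem.mp hx
        have : x = s.getD (k - 1 + i) 0 := by
          rw [List.getD_eq_getElem?_getD,
            List.getElem?_eq_getElem (show k - 1 + i < s.length by
              have hld : (s.drop (k-1)).length = s.length - (k-1) := List.length_drop
              omega)]
          rw [← hxe]
          simp [List.getElem_drop]
        rw [this, ← heq]
        exact pv_sorted_getD_le s hp (k - 1) (k - 1 + i) (by omega) (by
          have hld : (s.drop (k-1)).length = s.length - (k-1) := List.length_drop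
          omega)
      rw [pv_countP_take_drop s (k - 1) _, hdrop0]
      calc (s.take (k-1)).countP _ + 0 ≤ (s.take (k-1)).length := by
            simpa using List.countP_le_length (l := s.take (k-1)) (p := _)
        _ ≤ k - 1 := by simp
    omega
  · intro hcond
    rcases Nat.eq_zero_or_pos k with hk0 | hkpos
    · subst hk0
      rw [List.countP_eq_zero.mpr]
      intro x hx
      simp only [decide_eq_true_eq, not_lt]
      obtain ⟨i, hi, hxe⟩ := List.mem_iff_getElem.mp hx
      have : x = s.getD i 0 := by
        rw [List.getD_eq_getElem?_getD, List.getElem?_eq_getElem hi, hxe]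
        simp
      rw [this]
      exact pv_sorted_getD_le s hp 0 i (by omega) hi
    · have hne : s.getD (k - 1) 0 ≠ s.getD k 0 := by
        rcases hcond with h | h
        · omega
        · exact h
      have hlt : s.getD (k - 1) 0 < s.getD k 0 :=
        lt_of_le_of_ne (pv_sorted_getD_le s hp (k - 1) k (by omega) hk) hne
      have htake : (s.take k).countP (fun x => decide (x < s.getD k 0)) = k := by
        rw [List.countP_eq_length.mpr, List.length_take]
        · omega
        · intro x hx
          simp only [decide_eq_true_eq]
          obtain ⟨i, hi, hxe⟩ := List.mem_iff_getElem.mp hx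
          have hilen : i < k := by
            have hlt : (s.take k).length = min k s.length := List.length_take
            omega
          have : x = s.getD i 0 := by
            rw [List.getD_eq_getElem?_getD,
              List.getElem?_eq_getElem (show i < s.length by omega), ← hxe]
            simp [List.getElem_take]
          rw [this]
          exact lt_of_le_of_lt (pv_sorted_getD_le s hp i (k - 1) (by omega) (by omega)) hlt
      have hdrop : (s.drop k).countP (fun x => decide (x < s.getD k 0)) = 0 := by
        rw [List.countP_eq_zero]
        intro x hx
        simp only [decide_eq_true_eq, not_lt]
        obtain ⟨i, hi, hxe⟩ := List.mem_iff_getElem.mp hx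
        have : x = s.getD (k + i) 0 := by
          rw [List.getD_eq_getElem?_getD,
            List.getElem?_eq_getElem (show k + i < s.length by
              have hld : (s.drop k).length = s.length - k := List.length_drop
              omega), ← hxe]
          simp [List.getElem_drop]
        rw [this]
        exact pv_sorted_getD_le s hp k (k + i) (by omega) (by
          have hld : (s.drop k).length = s.length - k := List.length_drop
          omega)
      rw [pv_countP_take_drop s k _, htake, hdrop]
      omega

-- the mask: zero out every element equal to its left neighbour
def pvMk : Int → List Int → List Int
  | _, [] => []
  | p, x :: t => (if x = p then 0 else x) :: pvMk x t

def pvMask : List Int → List Int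
  | [] => []
  | x :: t => x :: pvMk x t

theorem pv_mk_length : ∀ (t : List Int) (p : Int), (pvMk p t).length = t.length := by
  intro t
  induction t with
  | nil => intro p; rfl
  | cons x t ih => intro p; simp [pvMk, ih]

theorem pv_mask_length (s : List Int) : (pvMask s).length = s.length := by
  cases s with
  | nil => rfl
  | cons x t => simp [pvMask, pv_mk_length]

theorem pv_mk_getD : ∀ (t : List Int) (p : Int) (k : Nat), k < t.length →
    (pvMk p t).getD k 0 =
      if (if k = 0 then p else t.getD (k - 1) 0) ≠ t.getD k 0 then t.getD k 0 else 0 := by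
  intro t
  induction t with
  | nil => intro p k hk; simp at hk
  | cons x t ih =>
    intro p k hk
    cases k with
    | zero =>
      simp only [pvMk, List.getD_cons_zero, if_pos rfl]
      by_cases hxp : x = p
      · rw [if_pos hxp, if_neg (by simp [hxp])]
      · rw [if_neg hxp, if_pos (by simp; exact fun h => hxp h.symm)]
    | succ k =>
      simp only [pvMk, List.getD_cons_succ]
      rw [ih x k (by simpa using hk)]
      cases k with
      | zero => simp
      | succ k => simp

theorem pv_mask_getD (s : List Int) (k : Nat) (hk : k < s.length) :
    (pvMask s).getD k 0 =
      if (k = 0 ∨ s.getD (k - 1) 0 ≠ s.getD k 0) then s.getD k 0 else 0 := by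
  cases s with
  | nil => simp at hk
  | cons x t =>
    cases k with
    | zero => simp [pvMask]
    | succ k =>
      simp only [pvMask, List.getD_cons_succ]
      rw [pv_mk_getD t x k (by simpa using hk)]
      cases k with
      | zero => simp
      | succ k => simp

theorem pv_canon_eq_mask (nums : List Int) : pvCanon nums = pvMask (pvS nums) := by
  have hp : (pvS nums).Pairwise (· ≤ ·) := by
    simpa using PySem.List.sorted_pairwise nums (fun x => x)
  have hslen : (pvS nums).length = nums.length := PySem.List.length_sorted nums _ _
  obtain ⟨hclen, hcval⟩ := pv_canon_char nums
  apply List.ext_getElem (by rw [hclen, pv_mask_length, hslen])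
  intro i h1 h2
  have hi : i < nums.length := by omega
  have his : i < (pvS nums).length := by omega
  have hL : (pvCanon nums)[i] = (pvCanon nums).getD i 0 := by
    rw [List.getD_eq_getElem?_getD, List.getElem?_eq_getElem h1]
    simp
  have hR : (pvMask (pvS nums))[i] = (pvMask (pvS nums)).getD i 0 := by
    rw [List.getD_eq_getElem?_getD, List.getElem?_eq_getElem h2]
    simp
  rw [hL, hR, hcval i hi, pv_mask_getD _ i his]
  by_cases hc : (pvS nums).idxOf ((pvS nums).getD i 0) = i
  · rw [if_pos hc, if_pos ((pv_first_occ_iff _ hp i his).mp hc)]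
  · rw [if_neg hc, if_neg (fun h => hc ((pv_first_occ_iff _ hp i his).mpr h))]

-- ---------- the fill scan undoes the mask ----------

theorem pv_scan_mk_nonzero : ∀ (t : List Int) (p : Int), p ≠ 0 → (∀ x ∈ t, x ≠ 0) →
    pvScan (pvMk p t) p = t := by
  intro t
  induction t with
  | nil => intro p _ _; rfl
  | cons x t ih =>
    intro p hp hall
    have hx : x ≠ 0 := hall x (by simp)
    by_cases hxp : x = p
    · subst hxp
      rw [show pvMk x (x :: t) = 0 :: pvMk x t from by simp [pvMk], pv_scan_zero_cons,
        ih x hx (fun y hy => hall y (by simp [hy]))]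
    · rw [show pvMk p (x :: t) = x :: pvMk x t from by simp [pvMk, hxp], pv_scan_cons,
        if_pos hx, ih x hx (fun y hy => hall y (by simp [hy]))]

theorem pv_scan_mask_nonzero (s : List Int) (h : ∀ x ∈ s, x ≠ 0) (prev : Int) :
    pvScan (pvMask s) prev = s := by
  cases s with
  | nil => rfl
  | cons x t =>
    have hx : x ≠ 0 := h x (by simp)
    show pvScan (x :: pvMk x t) prev = x :: t
    rw [pv_scan_cons, if_pos hx, pv_scan_mk_nonzero t x hx (fun y hy => h y (by simp [hy]))]

theorem pv_scan_mk_sorted : ∀ (t : List Int) (p : Int), (p :: t).Pairwise (· ≤ ·) → 0 ≤ p →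
    pvScan (pvMk p t) p = t := by
  intro t
  induction t with
  | nil => intro p _ _; rfl
  | cons x t ih =>
    intro p hp hp0
    obtain ⟨hall, hp'⟩ := List.pairwise_cons.mp hp
    have hpx : p ≤ x := hall x (by simp)
    by_cases hxp : x = p
    · subst hxp
      rw [show pvMk x (x :: t) = 0 :: pvMk x t from by simp [pvMk], pv_scan_zero_cons,
        ih x hp' (by omega)]
    · have hx0 : x ≠ 0 := by
        intro h
        have : p < x := lt_of_le_of_ne hpx (fun h' => hxp h'.symm)
        omega
      rw [show pvMk p (x :: t) = x :: pvMk x t from by simp [pvMk, hxp], pv_scan_cons,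
        if_pos hx0, ih x hp' (by omega)]

theorem pv_scan_mask_nonneg (s : List Int) (hp : s.Pairwise (· ≤ ·))
    (hpos : ∀ x ∈ s, 0 ≤ x) : pvScan (pvMask s) 0 = s := by
  cases s with
  | nil => rfl
  | cons x t =>
    have hx0 : 0 ≤ x := hpos x (by simp)
    have hhead : (if x ≠ 0 then x else 0) = x := by
      by_cases h : x = 0 <;> simp [h]
    show pvScan (x :: pvMk x t) 0 = x :: t
    rw [pv_scan_cons, hhead, pv_scan_mk_sorted t x hp hx0]

theorem pv_mk_zero : ∀ t : List Int, (∀ x ∈ t, x = 0) → pvMk 0 t = t := by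
  intro t
  induction t with
  | nil => intro _; rfl
  | cons x t ih =>
    intro h
    have hx : x = 0 := h x (by simp)
    subst hx
    simp only [pvMk]
    rw [ih (fun y hy => h y (by simp [hy]))]
    simp

theorem pv_scan_mask_allzero (s : List Int) (h : ∀ x ∈ s, x = 0) :
    pvScan (pvMask s) ((pvMask s).getLastD 0) = s := by
  have hmask : pvMask s = s := by
    cases s with
    | nil => rfl
    | cons x t =>
      have hx : x = 0 := h x (by simp)
      subst hx
      simp only [pvMask]
      rw [pv_mk_zero t (fun y hy => h y (by simp [hy]))]
  rw [hmask]
  have hlast : ∀ (t : List Int) (d : Int), (∀ x ∈ t, x = 0) → d = 0 → t.getLastD d = 0 := by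
    intro t
    induction t with
    | nil => intro d _ hd; simpa
    | cons x t ih =>
      intro d h hd
      rw [List.getLastD_cons]
      exact ih x (fun y hy => h y (by simp [hy])) (h x (by simp))
  rw [hlast s 0 h rfl]
  have : ∀ t : List Int, (∀ x ∈ t, x = 0) → pvScan t 0 = t := by
    intro t
    induction t with
    | nil => intro _; rfl
    | cons x t ih =>
      intro h
      have hx : x = 0 := h x (by simp)
      subst hx
      rw [pv_scan_zero_cons, ih (fun y hy => h y (by simp [hy]))]
  exact this s h

-- ---------- max / duplicate-last facts ----------

theorem pv_foldrmax_le : ∀ (l : List Int) (x : Int), x ∈ l → x ≤ l.foldr max 0 := by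
  intro l
  induction l with
  | nil => intro x hx; cases hx
  | cons a t ih =>
    intro x hx
    rcases List.mem_cons.mp hx with rfl | hx'
    · simp [le_max_iff]
    · simp only [List.foldr_cons, le_max_iff]
      exact Or.inr (ih x hx')

theorem pv_foldrmax_mem : ∀ l : List Int, l.foldr max 0 = 0 ∨ l.foldr max 0 ∈ l := by
  intro l
  induction l with
  | nil => simp
  | cons a t ih =>
    simp only [List.foldr_cons]
    rcases le_total a (t.foldr max 0) with h | h
    · rw [max_eq_right h]
      rcases ih with h0 | hm
      · exact Or.inl h0
      · exact Or.inr (by simp [hm])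
    · rw [max_eq_left h]
      exact Or.inr (by simp)

theorem pv_sorted_le_last (s : List Int) (hp : s.Pairwise (· ≤ ·)) (x : Int) (hx : x ∈ s) :
    x ≤ s.getD (s.length - 1) 0 := by
  obtain ⟨i, hi, hxe⟩ := List.mem_iff_getElem.mp hx
  have hxg : x = s.getD i 0 := by
    rw [List.getD_eq_getElem?_getD, List.getElem?_eq_getElem hi, hxe]
    simp
  rw [hxg]
  exact pv_sorted_getD_le s hp i (s.length - 1) (by omega) (by omega)

theorem pv_max_eq_last (nums : List Int) (h0 : (0 : Int) ∈ nums) :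
    pvMax nums = (pvS nums).getD ((pvS nums).length - 1) 0 := by
  have hp : (pvS nums).Pairwise (· ≤ ·) := by
    simpa using PySem.List.sorted_pairwise nums (fun x => x)
  have h0s : (0 : Int) ∈ pvS nums := by rw [pvS, PySem.List.mem_sorted]; exact h0
  have hne : (pvS nums) ≠ [] := by intro h; rw [h] at h0s; cases h0s
  have hMmem : (pvS nums).getD ((pvS nums).length - 1) 0 ∈ pvS nums :=
    pv_getD_mem _ _ (by have := List.length_pos_of_ne_nil hne; omega)
  have hMnums : (pvS nums).getD ((pvS nums).length - 1) 0 ∈ nums := by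
    rw [← PySem.List.mem_sorted nums (fun x => x) false]; exact hMmem
  apply le_antisymm
  · rcases pv_foldrmax_mem nums with hz | hm
    · have h00 : pvMax nums = 0 := hz
      rw [h00]
      exact pv_sorted_le_last _ hp 0 h0s
    · exact pv_sorted_le_last _ hp _ (by rw [pvS, PySem.List.mem_sorted]; exact hm)
  · exact pv_foldrmax_le nums _ hMnums

theorem pv_two_le_length (s : List Int) (h0 : (0 : Int) ∈ s) (x : Int) (hx : x ∈ s)
    (hne : x ≠ 0) : 2 ≤ s.length := by
  cases s with
  | nil => cases h0
  | cons a t =>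
    cases t with
    | nil =>
      simp only [List.mem_singleton] at h0 hx
      exact absurd (hx.trans h0.symm) hne
    | cons b t => simp only [List.length_cons]; omega

-- count ≥ 2 of the last element forces a duplicate at the end, and conversely
theorem pv_count_last_dup (s : List Int) (hp : s.Pairwise (· ≤ ·)) (h2 : 2 ≤ s.length)
    (hc : 2 ≤ s.count (s.getD (s.length - 1) 0)) :
    s.getD (s.length - 2) 0 = s.getD (s.length - 1) 0 := by
  by_contra hne
  have hlt : s.getD (s.length - 2) 0 < s.getD (s.length - 1) 0 :=
    lt_of_le_of_ne (pv_sorted_getD_le s hp (s.length - 2) (s.length - 1) (by omega) (by omega))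
      hne
  have hdrop : s.drop (s.length - 1) = [s.getD (s.length - 1) 0] := by
    rw [pv_drop_cons s (s.length - 1) (by omega), List.drop_eq_nil_of_le (by omega)]
  have htake0 : (s.take (s.length - 1)).count (s.getD (s.length - 1) 0) = 0 := by
    rw [List.count_eq_zero]
    intro hmem
    obtain ⟨i, hi, hxe⟩ := List.mem_iff_getElem.mp hmem
    have hilen : i < s.length - 1 := by
      have hlt : (s.take (s.length - 1)).length = min (s.length - 1) s.length := List.length_take
      omega
    have hx : s.getD (s.length - 1) 0 = s.getD i 0 := by
      rw [List.getD_eq_getElem?_getD (l := s) (i := i),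
        List.getElem?_eq_getElem (show i < s.length by omega), ← hxe]
      simp [List.getElem_take]
    have : s.getD i 0 ≤ s.getD (s.length - 2) 0 :=
      pv_sorted_getD_le s hp i (s.length - 2) (by omega) (by omega)
    omega
  have : s.count (s.getD (s.length - 1) 0) = 1 := by
    rw [pv_count_take_drop s (s.length - 1) _, htake0, hdrop]
    simp
  omega

theorem pv_dup_count_ge_two (s : List Int) (h2 : 2 ≤ s.length)
    (hdup : s.getD (s.length - 2) 0 = s.getD (s.length - 1) 0) :
    2 ≤ s.count (s.getD (s.length - 1) 0) := by
  have hdrop : s.drop (s.length - 2) =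
      s.getD (s.length - 2) 0 :: s.getD (s.length - 1) 0 :: s.drop s.length := by
    rw [pv_drop_cons s (s.length - 2) (by omega),
      show s.length - 2 + 1 = s.length - 1 from by omega,
      pv_drop_cons s (s.length - 1) (by omega),
      show s.length - 1 + 1 = s.length from by omega]
  have : 2 ≤ (s.drop (s.length - 2)).count (s.getD (s.length - 1) 0) := by
    rw [hdrop, List.count_cons, List.count_cons]
    simp only [List.getD_eq_getElem?_getD] at hdup
    simp [List.getD_eq_getElem?_getD, hdup]
  calc 2 ≤ (s.drop (s.length - 2)).count (s.getD (s.length - 1) 0) := by omega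
    _ ≤ s.count (s.getD (s.length - 1) 0) := by
        rw [pv_count_take_drop s (s.length - 2) _]
        omega

-- ---------- inside D_, the scan never recovers the sorted list ----------

theorem pv_scan_mk_neg : ∀ (t : List Int) (p : Int), (p :: t).Pairwise (· ≤ ·) → p < 0 →
    (0 : Int) ∈ t → pvScan (pvMk p t) p ≠ t := by
  intro t
  induction t with
  | nil => intro p _ _ h0; cases h0
  | cons x t ih =>
    intro p hp hpneg h0
    obtain ⟨hall, hp'⟩ := List.pairwise_cons.mp hp
    by_cases hx0 : x = 0
    · subst hx0
      have hxp : ¬ ((0 : Int) = p) := by omega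
      rw [show pvMk p ((0 : Int) :: t) = 0 :: pvMk 0 t from by simp [pvMk, hxp],
        pv_scan_zero_cons]
      intro h
      have := (List.cons.injEq _ _ _ _).mp h
      omega
    · have h0t : (0 : Int) ∈ t := by
        rcases List.mem_cons.mp h0 with h | h
        · exact absurd h.symm hx0
        · exact h
      by_cases hxp : x = p
      · subst hxp
        rw [show pvMk x (x :: t) = 0 :: pvMk x t from by simp [pvMk], pv_scan_zero_cons]
        intro h
        obtain ⟨h1, h2⟩ := (List.cons.injEq _ _ _ _).mp h
        exact ih x hp' (by omega) h0t h2
      · have hxneg : x < 0 := by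
          obtain ⟨hallx, -⟩ := List.pairwise_cons.mp hp'
          have : x ≤ 0 := hallx 0 h0t
          omega
        rw [show pvMk p (x :: t) = x :: pvMk x t from by simp [pvMk, hxp], pv_scan_cons,
          if_pos hx0]
        intro h
        obtain ⟨-, h2⟩ := (List.cons.injEq _ _ _ _).mp h
        exact ih x hp' hxneg h0t h2

theorem pv_scan_mask_neg (s : List Int) (hp : s.Pairwise (· ≤ ·)) (h0 : (0 : Int) ∈ s)
    (hneg : ∃ x ∈ s, x < 0) (prev : Int) : pvScan (pvMask s) prev ≠ s := by
  cases s with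
  | nil => cases h0
  | cons a t =>
    obtain ⟨hall, hp'⟩ := List.pairwise_cons.mp hp
    have haneg : a < 0 := by
      obtain ⟨x, hx, hxneg⟩ := hneg
      rcases List.mem_cons.mp hx with rfl | hx'
      · exact hxneg
      · exact lt_of_le_of_lt (hall x hx') hxneg
    have ha0 : a ≠ 0 := by omega
    have h0t : (0 : Int) ∈ t := by
      rcases List.mem_cons.mp h0 with h | h
      · exact absurd h.symm ha0
      · exact h
    show pvScan (a :: pvMk a t) prev ≠ a :: t
    rw [pv_scan_cons, if_pos ha0]
    intro h
    obtain ⟨-, h2⟩ := (List.cons.injEq _ _ _ _).mp h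
    exact pv_scan_mk_neg t a hp haneg h0t h2

theorem pv_scan_mask_posmax (s : List Int) (hp : s.Pairwise (· ≤ ·)) (h0 : (0 : Int) ∈ s)
    (hpos : ∀ x ∈ s, 0 ≤ x) (h2 : 2 ≤ s.length)
    (hlast_ne : s.getD (s.length - 2) 0 ≠ s.getD (s.length - 1) 0)
    (hMne : s.getD (s.length - 1) 0 ≠ 0) :
    pvScan (pvMask s) ((pvMask s).getLastD 0) ≠ s := by
  have hmne : pvMask s ≠ [] := by
    intro h
    have := pv_mask_length s
    rw [h] at this
    simp at this
    omega
  have hprev : (pvMask s).getLastD 0 = s.getD (s.length - 1) 0 := by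
    have hcond : s.length - 1 = 0 ∨ s.getD (s.length - 1 - 1) 0 ≠ s.getD (s.length - 1) 0 := by
      right
      rw [show s.length - 1 - 1 = s.length - 2 from by omega]
      exact hlast_ne
    rw [← pv_getD_last _ hmne, pv_mask_length, pv_mask_getD s (s.length - 1) (by omega),
      if_pos hcond]
  cases s with
  | nil => simp at h2
  | cons a t =>
    have ha : a = 0 := by
      obtain ⟨hall, -⟩ := List.pairwise_cons.mp hp
      have h1 : a ≤ 0 := by
        rcases List.mem_cons.mp h0 with h | h
        · omega
        · exact hall 0 h
      have h2 : 0 ≤ a := hpos a (by simp)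
      omega
    subst ha
    show pvScan ((0 : Int) :: pvMk 0 t) ((pvMask ((0 : Int) :: t)).getLastD 0) ≠ (0 : Int) :: t
    rw [pv_scan_zero_cons]
    intro h
    obtain ⟨h1, -⟩ := (List.cons.injEq _ _ _ _).mp h
    rw [hprev] at h1
    exact hMne h1

-- ===== VERDICT (by name: the statements are the Claim_ definitions above) =====

theorem comparison_count_sort_spec : Claim_unchanged_comparison_count_sort := by
  intro nums _
  unfold Spec_comparison_count_sort
  intro hnD
  rw [pv_A_scan, pv_canon_eq_mask]
  show pvScan (pvMask (pvS nums)) ((pvMask (pvS nums)).getLastD 0) = pvS nums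
  have hp : (pvS nums).Pairwise (· ≤ ·) := by
    simpa using PySem.List.sorted_pairwise nums (fun x => x)
  by_cases h0 : (0 : Int) ∈ nums
  · by_cases hnz : ∃ x ∈ nums, x ≠ 0
    · have hr : ¬ ((∃ x ∈ nums, x < 0) ∨ nums.count (pvMax nums) = 1) := fun hr =>
        hnD ⟨h0, hnz, hr⟩
      push_neg at hr
      obtain ⟨hneg, hcnt⟩ := hr
      have hpos : ∀ x ∈ pvS nums, 0 ≤ x := by
        intro x hx
        have : x ∈ nums := by rw [← PySem.List.mem_sorted nums (fun y => y) false]; exact hx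
        have := hneg x this
        omega
      have h0s : (0 : Int) ∈ pvS nums := by rw [pvS, PySem.List.mem_sorted]; exact h0
      obtain ⟨x, hx, hxne⟩ := hnz
      have hxs : x ∈ pvS nums := by rw [pvS, PySem.List.mem_sorted]; exact hx
      have h2 : 2 ≤ (pvS nums).length := pv_two_le_length _ h0s x hxs hxne
      -- the last element of s equals pvMax and occurs at least twice, so the mask ends in 0
      have hM := pv_max_eq_last nums h0
      have hperm : (pvS nums).Perm nums := PySem.List.sorted_perm nums (fun y => y) false
      have hcnt2 : 2 ≤ (pvS nums).count ((pvS nums).getD ((pvS nums).length - 1) 0) := by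
        have h1 : (pvS nums).count ((pvS nums).getD ((pvS nums).length - 1) 0) =
            nums.count (pvMax nums) := by rw [hM, hperm.count_eq]
        have hpos' : 0 < (pvS nums).count ((pvS nums).getD ((pvS nums).length - 1) 0) :=
          List.count_pos_iff.mpr (pv_getD_mem _ _ (by omega))
        omega
      have hdup := pv_count_last_dup _ hp h2 hcnt2
      have hmne : pvMask (pvS nums) ≠ [] := by
        intro h
        have := pv_mask_length (pvS nums)
        rw [h] at this
        simp at this
        omega
      have hlast : (pvMask (pvS nums)).getLastD 0 = 0 := by
        rw [← pv_getD_last _ hmne, pv_mask_length,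
          pv_mask_getD (pvS nums) ((pvS nums).length - 1) (by omega), if_neg]
        push_neg
        refine ⟨by omega, ?_⟩
        rw [show (pvS nums).length - 1 - 1 = (pvS nums).length - 2 from by omega]
        simpa using hdup
      rw [hlast]
      exact pv_scan_mask_nonneg _ hp hpos
    · push_neg at hnz
      apply pv_scan_mask_allzero
      intro x hx
      exact hnz x (by rw [← PySem.List.mem_sorted nums (fun y => y) false]; exact hx)
  · apply pv_scan_mask_nonzero
    intro x hx
    intro hx0
    subst hx0
    exact h0 (by rw [← PySem.List.mem_sorted nums (fun y => y) false]; exact hx)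

theorem comparison_count_sort_changed : Claim_changed_comparison_count_sort := by
  unfold Claim_changed_comparison_count_sort
  decide

theorem comparison_count_sort_tight : Claim_exact_comparison_count_sort := by
  intro nums _ hD
  obtain ⟨h0, hnz, hr⟩ := hD
  rw [pv_A_scan, pv_canon_eq_mask]
  show pvScan (pvMask (pvS nums)) ((pvMask (pvS nums)).getLastD 0) ≠ pvS nums
  have hp : (pvS nums).Pairwise (· ≤ ·) := by
    simpa using PySem.List.sorted_pairwise nums (fun x => x)
  have h0s : (0 : Int) ∈ pvS nums := by rw [pvS, PySem.List.mem_sorted]; exact h0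
  by_cases hneg : ∃ x ∈ nums, x < 0
  · obtain ⟨x, hx, hxneg⟩ := hneg
    exact pv_scan_mask_neg _ hp h0s ⟨x, by rw [pvS, PySem.List.mem_sorted]; exact hx, hxneg⟩ _
  · have hc1 : nums.count (pvMax nums) = 1 := by
      rcases hr with h | h
      · exact absurd h hneg
      · exact h
    push_neg at hneg
    have hpos : ∀ x ∈ pvS nums, 0 ≤ x := by
      intro x hx
      have : x ∈ nums := by rw [← PySem.List.mem_sorted nums (fun y => y) false]; exact hx
      have := hneg x this
      omega
    obtain ⟨x, hx, hxne⟩ := hnz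
    have hxs : x ∈ pvS nums := by rw [pvS, PySem.List.mem_sorted]; exact hx
    have h2 : 2 ≤ (pvS nums).length := pv_two_le_length _ h0s x hxs hxne
    have hM := pv_max_eq_last nums h0
    have hperm : (pvS nums).Perm nums := PySem.List.sorted_perm nums (fun y => y) false
    have hcnt1 : (pvS nums).count ((pvS nums).getD ((pvS nums).length - 1) 0) = 1 := by
      rw [← hM, hperm.count_eq]
      exact hc1
    have hlast_ne : (pvS nums).getD ((pvS nums).length - 2) 0 ≠
        (pvS nums).getD ((pvS nums).length - 1) 0 := by
      intro heq
      have := pv_dup_count_ge_two _ h2 heq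
      omega
    have hMne : (pvS nums).getD ((pvS nums).length - 1) 0 ≠ 0 := by
      have hxpos : 0 < x := lt_of_le_of_ne (by have := hneg x hx; omega) (Ne.symm hxne)
      have := pv_sorted_le_last _ hp x hxs
      omega
    exact pv_scan_mask_posmax _ hp h0s hpos h2 hlast_ne hMne
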